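-- pv_equiv track=rewrite | github.com/j1angray/news | 6_TFIDF/6.py | count_keyword
-- ===== SOURCE A (Python) =====
-- def count_keyword(keylist,wordlist): #去除停用词后的词频统计
-- 	dic={}
-- 	for key in keylist.split('/'):
-- 		if key not in wordlist:
-- 			if key in dic:
-- 				dic[key]+=1
-- 			else:
-- 				dic[key]=1
-- 	return dic
-- ===== SOURCE B (Python) =====
-- def count_keyword(keylist, wordlist):
--     toks = [k for k in keylist.split('/') if k not in wordlist]
--     dic = {}
--     while toks:
--         h = toks[0]
--         rest = [x for x in toks[1:] if x != h]
--         dic[h] = len(toks) - len(rest)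
--         toks = rest
--     return dic
-- ===== Notes on version B (the rewrite author's own statement) =====
-- stated objective: alternative
-- what changed: Replaces A's dict hash-and-increment loop with a partition recursion: repeatedly take the first remaining filtered token, strip all of its occurrences with a list partition, and record its count as the length difference, so no counting dictionary (and no increment) exists at all.
import Mathlib
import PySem

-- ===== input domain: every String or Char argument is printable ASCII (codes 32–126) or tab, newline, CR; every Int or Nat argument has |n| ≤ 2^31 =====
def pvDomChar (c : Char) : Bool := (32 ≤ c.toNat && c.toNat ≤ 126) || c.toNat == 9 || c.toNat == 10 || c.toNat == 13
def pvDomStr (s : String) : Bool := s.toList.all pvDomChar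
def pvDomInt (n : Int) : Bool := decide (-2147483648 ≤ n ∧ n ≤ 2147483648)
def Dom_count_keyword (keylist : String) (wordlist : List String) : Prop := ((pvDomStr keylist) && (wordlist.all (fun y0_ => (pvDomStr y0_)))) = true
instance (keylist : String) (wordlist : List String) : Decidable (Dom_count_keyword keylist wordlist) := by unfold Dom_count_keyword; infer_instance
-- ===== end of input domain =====

-- B counts by partition recursion — repeatedly take the first remaining token, strip all its
-- occurrences and record the count as a length difference — instead of A's hash-and-increment loop;
-- objective: alternative (trades the dict for repeated list partitioning, O(u·n) vs A's O(n·m)).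


-- ===== PORT A =====
def count_keyword (keylist : String) (wordlist : List String) : List (String × Int) :=
  (((PySem.Str.split? keylist "/").getD []).foldl
    (fun dic key =>
      if !(wordlist.contains key) then
        if dic.contains key then
          dic.insert key (dic.getD key 0 + 1)
        else
          dic.insert key 1
      else dic)
    PySem.Dict.empty).items

-- ===== PORT B =====
-- the 'while toks: h = toks[0]; rest = [x for x in toks[1:] if x != h]; dic[h] = len(toks)-len(rest); toks = rest' loop
def count_keyword_go (toks : List String) : List (String × Int) :=
  match toks with
  | [] => []
  | h :: t =>
    (h, ((1 + t.length : Int) - ((t.filter (fun x => x != h)).length : Int))) ::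
      count_keyword_go (t.filter (fun x => x != h))
termination_by toks.length
decreasing_by
  simp only [List.length_cons, List.length_unattach]
  exact Nat.lt_succ_of_le (le_trans (List.length_filter_le _ _) (by simp))

def count_keyword_alt (keylist : String) (wordlist : List String) : List (String × Int) :=
  let toks := ((PySem.Str.split? keylist "/").getD []).filter (fun k => !(wordlist.contains k))
  count_keyword_go toks

-- ===== PRECONDITION & SPEC =====
def Spec_count_keyword (keylist : String) (wordlist : List String) (out : List (String × Int)) : Prop := out = count_keyword_alt keylist wordlist
instance (keylist : String) (wordlist : List String) (out : List (String × Int)) : Decidable (Spec_count_keyword keylist wordlist out) := by unfold Spec_count_keyword; infer_instance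

-- ===== CLAIM (what is proved, stated in full; the proofs are below) =====
def Claim_equal_count_keyword : Prop := ∀ (keylist : String) (wordlist : List String), Dom_count_keyword keylist wordlist → Spec_count_keyword keylist wordlist (count_keyword keylist wordlist)

-- ===== LEMMAS AND PROOFS =====

-- A's two branches are one counter step: when the key is absent, getD is 0, so 'insert key 1' IS 'insert key (getD + 1)'.
theorem count_keyword_step_eq (wordlist : List String) :
    (fun (dic : PySem.Dict String Int) (key : String) =>
      if !(wordlist.contains key) then
        if dic.contains key then dic.insert key (dic.getD key 0 + 1)
        else dic.insert key 1
      else dic)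
    = fun dic key =>
      if !(wordlist.contains key) then dic.insert key (dic.getD key 0 + 1) else dic := by
  funext dic key
  by_cases hw : (!(wordlist.contains key)) = true
  · simp only [hw, if_true]
    by_cases hc : dic.contains key = true
    · simp [hc]
    · simp only [Bool.not_eq_true] at hc
      rw [PySem.Dict.getD_of_not_contains (h := hc)]
      simp [hc]
  · have hm : key ∈ wordlist := by simpa using hw
    simp [hm]

-- stripping every copy of h removes exactly 'count h' elements
theorem length_filter_ne_add_count (t : List String) (h : String) :
    (t.filter (fun x => x != h)).length + t.count h = t.length := by
  induction t with
  | nil => simp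
  | cons a t ih =>
    by_cases hah : a = h
    · subst hah; simp; omega
    · simp [hah, bne_iff_ne]; omega

-- Python's set/dict of first occurrences commutes with filtering the underlying list
theorem ofList_filter {α : Type} [BEq α] [LawfulBEq α] (p : α → Bool) (t : List α) :
    (PySem.Set.ofList t).filter p = PySem.Set.ofList (t.filter p) := by
  induction t with
  | nil => rfl
  | cons a t ih =>
    rw [PySem.Set.ofList_cons, List.filter_cons, List.filter_cons]
    by_cases hp : p a = true
    · rw [if_pos hp, if_pos hp, PySem.Set.ofList_cons, ← ih]
      simp only [PySem.Set.discard, List.filter_filter, List.cons.injEq, true_and]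
      apply List.filter_congr
      intro x _
      exact Bool.and_comm _ _
    · rw [if_neg hp, if_neg hp, ← ih]
      simp only [PySem.Set.discard, List.filter_filter]
      apply List.filter_congr
      intro x _
      by_cases hx : x = a <;> simp [hx, hp]

-- the partition recursion produces Counter(toks).items(): first occurrences paired with counts
theorem count_keyword_go_eq (toks : List String) :
    count_keyword_go toks = (PySem.Set.ofList toks).map (fun k => (k, (toks.count k : Int))) := by
  fun_induction count_keyword_go toks with
  | case1 => rfl
  | case2 h t ih =>
    simp only [List.unattach_filter, List.unattach_attach] at ih
    rw [PySem.Set.ofList_cons]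
    have hdi : (PySem.Set.ofList t).discard h = PySem.Set.ofList (t.filter (fun x => x != h)) := by
      simpa [PySem.Set.discard] using ofList_filter (fun x => x != h) t
    simp only [List.map_cons, hdi, List.cons.injEq]
    constructor
    · have := length_filter_ne_add_count t h
      
      simp only [List.count_cons_self, Prod.mk.injEq, true_and]
      push_cast
      omega
    · rw [ih]
      apply List.map_congr_left
      intro k hk
      have hkr : k ∈ t.filter (fun x => x != h) := (PySem.Set.mem_ofList _ _).1 hk
      have hkne : k ≠ h := by
        have := (List.mem_filter.1 hkr).2
        simpa [bne_iff_ne] using this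
      have hcnt : (t.filter (fun x => x != h)).count k = t.count k :=
        List.count_filter (by simpa [bne_iff_ne] using hkne)
      simp [hcnt, Ne.symm hkne]

-- ===== VERDICT (by name: the statement is the Claim_ definition above) =====
theorem count_keyword_spec : Claim_equal_count_keyword := by
  intro keylist wordlist _
  unfold Spec_count_keyword count_keyword count_keyword_alt
  rw [count_keyword_step_eq]
  rw [← List.foldl_filter]
  rw [PySem.Dict.foldl_insert_getD_add_one_eq_counter]
  rw [PySem.Dict.items_counter]
  rw [count_keyword_go_eq]
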